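-- pv_equiv track=rewrite | github.com/predicateacademy/physical-computing | lightshow/lightshow_patterns.py | left_right
-- ===== SOURCE A (Python) =====
-- def left_right(led):
--    patterns = []
--    for x in range(len(led)):
--       pattern = ''
--       for y in range(len(led)):
--          if x == y:
--             pattern += '1'
--          else:
--             pattern += '0'
--       patterns.append(pattern)
--    return patterns
-- ===== SOURCE B (Python) =====
-- def left_right(led):
--     n = len(led)
--     return ['0' * x + '1' + '0' * (n - x - 1) for x in range(n)]
-- ===== Notes on version B (the rewrite author's own statement) =====
-- stated objective: simpler
-- what changed: Each identity-matrix row is produced by the closed form '0'*x + '1' + '0'*(n-x-1) in a single comprehension, eliminating the inner per-character loop and the x==y branch; bulk string operations replace n per-character concatenations per row.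
import Mathlib
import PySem

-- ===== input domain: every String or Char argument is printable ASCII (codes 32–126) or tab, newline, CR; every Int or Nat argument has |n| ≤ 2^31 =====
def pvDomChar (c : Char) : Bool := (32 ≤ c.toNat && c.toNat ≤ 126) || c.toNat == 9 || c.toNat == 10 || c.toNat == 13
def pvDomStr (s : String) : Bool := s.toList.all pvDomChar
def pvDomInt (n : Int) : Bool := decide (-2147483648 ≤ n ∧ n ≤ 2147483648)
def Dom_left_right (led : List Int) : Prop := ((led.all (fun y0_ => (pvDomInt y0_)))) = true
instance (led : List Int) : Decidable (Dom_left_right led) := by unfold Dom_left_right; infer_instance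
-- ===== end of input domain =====

-- B builds each identity row with the closed form '0'*x + '1' + '0'*(n-x-1) in one comprehension,
-- eliminating A's inner per-character loop and the x==y branch (objective: simpler).


-- ===== PORT A =====
def left_right (led : List Int) : List String :=
  (PySem.List.pyRange 0 (led.length : Int) 1).foldl
    (fun patterns x =>
      patterns ++ [(PySem.List.pyRange 0 (led.length : Int) 1).foldl
        (fun pattern y => pattern ++ (if x = y then "1" else "0")) ""])
    []

-- ===== PORT B =====
def left_right_alt (led : List Int) : List String :=
  (List.range led.length).map (fun x =>
    String.ofList (List.replicate x '0') ++ "1" ++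
      String.ofList (List.replicate (led.length - x - 1) '0'))

-- ===== PRECONDITION & SPEC =====
def Spec_left_right (led : List Int) (out : List String) : Prop := out = left_right_alt led
instance (led : List Int) (out : List String) : Decidable (Spec_left_right led out) := by unfold Spec_left_right; infer_instance

-- ===== CLAIM (what is proved, stated in full; the proofs are below) =====
def Claim_equal_left_right : Prop := ∀ (led : List Int), Dom_left_right led → Spec_left_right led (left_right led)

-- ===== LEMMAS AND PROOFS =====

-- appending one element per step is mapping
theorem pvFoldl_append_map {α : Type} (f : α → String) (l : List α) (acc : List String) :
    l.foldl (fun ps x => ps ++ [f x]) acc = acc ++ l.map f := by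
  induction l generalizing acc with
  | nil => simp
  | cons a t ih => simp [ih]

-- appending one character per step builds the mapped character list
theorem pvFoldl_append_char {α : Type} (c : α → Char) (l : List α) (s : String) :
    l.foldl (fun p y => p ++ String.ofList [c y]) s = s ++ String.ofList (l.map c) := by
  induction l generalizing s with
  | nil => simp
  | cons a t ih =>
    rw [List.foldl_cons, ih, String.append_assoc, List.map_cons,
      show (c a :: List.map c t) = [c a] ++ List.map c t from rfl, String.ofList_append]

-- the characters of row x of the identity matrix, in closed form
theorem pvRow_chars (n x : Nat) (h : x < n) :
    (List.range n).map (fun (y : Nat) => if (x : Int) = (y : Int) then '1' else '0')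
      = List.replicate x '0' ++ '1' :: List.replicate (n - x - 1) '0' := by
  obtain ⟨m, rfl⟩ : ∃ m, n = x + 1 + m := ⟨n - x - 1, by omega⟩
  rw [List.range_add, List.range_succ]
  simp only [List.map_append, List.map_map, List.map_cons, List.map_nil]
  have first : (List.range x).map (fun (y : Nat) => if (x : Int) = (y : Int) then '1' else '0')
      = List.replicate x '0' := by
    refine List.eq_replicate_iff.mpr ⟨by simp, ?_⟩
    intro b hb
    simp only [List.mem_map, List.mem_range] at hb
    obtain ⟨y, hy, rfl⟩ := hb
    have hne : ¬ ((x : Int) = (y : Int)) := by omega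
    rw [if_neg hne]
  have last : (List.range m).map
        ((fun (y : Nat) => if (x : Int) = (y : Int) then '1' else '0') ∘ (fun k => x + 1 + k))
      = List.replicate m '0' := by
    refine List.eq_replicate_iff.mpr ⟨by simp, ?_⟩
    intro b hb
    simp only [List.mem_map, List.mem_range, Function.comp] at hb
    obtain ⟨k, hk, rfl⟩ := hb
    have hne : ¬ ((x : Int) = ((x + 1 + k : Nat) : Int)) := by omega
    rw [if_neg hne]
  rw [first, last]
  have hm : x + 1 + m - x - 1 = m := by omega
  simp [hm]

theorem left_right_spec : Claim_equal_left_right := by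
  unfold Claim_equal_left_right
  intro led _
  unfold Spec_left_right left_right left_right_alt
  set n := led.length with hn
  have hr : PySem.List.pyRange 0 (n : Int) 1 = (List.range n).map (fun k : Nat => (k : Int)) := by
    simpa using PySem.List.pyRange_zero_natCast n
  rw [hr, List.foldl_map, pvFoldl_append_map, List.nil_append]
  apply List.map_congr_left
  intro x hx
  have hxn : x < n := List.mem_range.mp hx
  rw [List.foldl_map]
  have hbody : (fun (p : String) (y : Nat) => p ++ (if ((x : Nat) : Int) = ((y : Nat) : Int) then "1" else "0"))
      = (fun (p : String) (y : Nat) => p ++ String.ofList [if (x : Int) = (y : Int) then '1' else '0']) := by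
    funext p y
    by_cases h : (x : Int) = (y : Int)
    · simp [h]
    · simp [h]
  rw [hbody, pvFoldl_append_char (fun (y : Nat) => if (x : Int) = (y : Int) then '1' else '0') (List.range n) "",
    pvRow_chars n x hxn,
    show ('1' :: List.replicate (n - x - 1) '0') = ['1'] ++ List.replicate (n - x - 1) '0' from rfl,
    String.ofList_append, String.ofList_append]
  have h1 : String.ofList ['1'] = "1" := by decide
  rw [h1, String.empty_append, String.append_assoc]
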